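-- pv_equiv track=rewrite | github.com/zhiting622/nonlinear | src/inflection_finder.py | _suffix_record_low_minima
-- ===== SOURCE A (Python) =====
-- import math
--
-- def _suffix_record_low_minima(min_idxs, y):
--     """Keep minima that are record lows when scanning right->left. Return in ascending order."""
--     kept, best = [], math.inf
--     for idx in reversed(min_idxs):
--         if y[idx] < best:
--             kept.append(idx)
--             best = y[idx]
--     kept.reverse()
--     return kept
-- ===== SOURCE B (Python) =====
-- def _suffix_record_low_minima(min_idxs, y):
--     """Keep minima that are record lows when scanning right->left. Return in ascending order."""
--     stack = []
--     for idx in min_idxs: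
--         v = y[idx]
--         while stack and y[stack[-1]] >= v:
--             stack.pop()
--         stack.append(idx)
--     return stack
-- ===== Notes on version B (the rewrite author's own statement) =====
-- stated objective: idiomatic
-- what changed: Replaces the reversed scan with a running minimum plus final reverse by a single left-to-right monotone-stack pass whose stack is already the answer in ascending order.
import Mathlib
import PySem

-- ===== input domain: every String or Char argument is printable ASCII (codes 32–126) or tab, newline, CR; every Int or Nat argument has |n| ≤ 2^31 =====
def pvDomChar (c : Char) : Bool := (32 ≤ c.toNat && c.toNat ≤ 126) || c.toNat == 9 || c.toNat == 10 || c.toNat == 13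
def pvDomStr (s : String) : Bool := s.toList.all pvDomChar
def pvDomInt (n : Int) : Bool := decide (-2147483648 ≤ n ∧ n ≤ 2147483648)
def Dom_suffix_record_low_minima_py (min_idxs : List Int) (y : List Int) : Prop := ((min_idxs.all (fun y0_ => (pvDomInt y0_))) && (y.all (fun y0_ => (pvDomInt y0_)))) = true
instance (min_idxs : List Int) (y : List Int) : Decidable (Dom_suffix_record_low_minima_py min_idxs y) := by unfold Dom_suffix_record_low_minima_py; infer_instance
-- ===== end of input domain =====

-- B replaces A's reversed record-low scan (reverse, running minimum, final reverse) by a single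
-- left-to-right monotone-stack pass whose stack is already the answer in ascending order.


-- ===== PORT A =====
-- y[idx]: Python raises IndexError out of range; Pre_ excludes that, so the total
-- form (pyGet? …).getD 0 is exact on Pre_ (negative indices wrap as in Python).
-- best = math.inf is modelled by `none`; `if y[idx] < best` with best = inf is always true.
def sufStepA (y : List Int) (st : List Int × Option Int) (idx : Int) : List Int × Option Int :=
  let vi := (PySem.List.pyGet? y idx).getD 0
  match st.2 with
  | none => (st.1 ++ [idx], some vi)
  | some b => if vi < b then (st.1 ++ [idx], some vi) else st

def suffix_record_low_minima_py (min_idxs : List Int) (y : List Int) : List Int :=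
  ((min_idxs.reverse.foldl (sufStepA y) ([], none)).1).reverse

-- ===== PORT B =====
-- the `while stack and y[stack[-1]] >= v: stack.pop()` loop; the stack is kept with its
-- TOP AT THE HEAD (so Python's append/pop at the end are head operations here), and the
-- final reverse restores Python's bottom-to-top list order of `return stack`.
def popW (y : List Int) (st : List Int) (vx : Int) : List Int :=
  match st with
  | [] => []
  | j :: rest => if vx ≤ (PySem.List.pyGet? y j).getD 0 then popW y rest vx else j :: rest

def suffix_record_low_minima_py_alt (min_idxs : List Int) (y : List Int) : List Int :=
  (min_idxs.foldl
    (fun st idx => idx :: popW y st ((PySem.List.pyGet? y idx).getD 0)) []).reverse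

-- ===== PRECONDITION & SPEC =====
-- Pre_ excludes exactly the inputs where Python's y[idx] raises IndexError (an index of
-- min_idxs outside -len(y)..len(y)-1); both A and B raise there.
def Pre_suffix_record_low_minima_py (min_idxs : List Int) (y : List Int) : Prop :=
  ∀ idx ∈ min_idxs, PySem.Raise.InRange y.length idx

instance (min_idxs : List Int) (y : List Int) : Decidable (Pre_suffix_record_low_minima_py min_idxs y) := by
  unfold Pre_suffix_record_low_minima_py; infer_instance

def pvWitness_suffix_record_low_minima_py : List Int × List Int := ([0, 2, -1], [5, 1, 4, 2])

def Spec_suffix_record_low_minima_py (min_idxs : List Int) (y : List Int) (out : List Int) : Prop := out = suffix_record_low_minima_py_alt min_idxs y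
instance (min_idxs : List Int) (y : List Int) (out : List Int) : Decidable (Spec_suffix_record_low_minima_py min_idxs y out) := by unfold Spec_suffix_record_low_minima_py; infer_instance

-- ===== CLAIM (what is proved, stated in full; the proofs are below) =====
def Claim_equal_suffix_record_low_minima_py : Prop := ∀ (min_idxs : List Int) (y : List Int), Dom_suffix_record_low_minima_py min_idxs y → Pre_suffix_record_low_minima_py min_idxs y → Spec_suffix_record_low_minima_py min_idxs y (suffix_record_low_minima_py min_idxs y)

-- ===== LEMMAS AND PROOFS =====

-- value of y[i] as both ports compute it
def vOf (y : List Int) (i : Int) : Int := (PySem.List.pyGet? y i).getD 0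

-- common specification: keep i iff its value is strictly below every later value
def sufSpec (y : List Int) : List Int → List Int
  | [] => []
  | i :: rest =>
      if ∀ j ∈ rest, vOf y i < vOf y j then i :: sufSpec y rest else sufSpec y rest

-- running minimum of values, as A's `best`
def bOf (y : List Int) : List Int → Option Int
  | [] => none
  | a :: t =>
      match bOf y t with
      | none => some (vOf y a)
      | some b => some (min (vOf y a) b)

theorem bOf_eq_none (y : List Int) (t : List Int) : bOf y t = none ↔ t = [] := by
  cases t with
  | nil => simp [bOf]
  | cons a t => cases h : bOf y t <;> simp [bOf, h]

theorem bOf_lt_iff (y : List Int) (x : Int) :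
    ∀ (t : List Int) (b : Int), bOf y t = some b → ((x < b) ↔ ∀ j ∈ t, x < vOf y j) := by
  intro t
  induction t with
  | nil => intro b h; simp [bOf] at h
  | cons a t ih =>
      intro b h
      cases ht : bOf y t with
      | none =>
          have ht0 : t = [] := (bOf_eq_none y t).mp ht
          subst ht0
          simp only [bOf] at h
          cases h
          simp
      | some c =>
          have hb : b = min (vOf y a) c := by
            simp [bOf, ht] at h; exact h.symm
          subst hb
          constructor
          · intro hx j hj
            rcases List.mem_cons.mp hj with rfl | hj
            · exact lt_of_lt_of_le hx (min_le_left _ _)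
            · exact (ih c ht).mp (lt_of_lt_of_le hx (min_le_right _ _)) j hj
          · intro hall
            exact lt_min (hall a (by simp))
              ((ih c ht).mpr fun j hj => hall j (List.mem_cons_of_mem _ hj))

theorem bOf_cons_some (y : List Int) (a : Int) (t : List Int) (b : Int)
    (ht : bOf y t = some b) : bOf y (a :: t) = some (min (vOf y a) b) := by
  simp [bOf, ht]

-- A's right-to-left fold characterised
theorem foldA_spec (y : List Int) :
    ∀ l : List Int,
      l.foldr (fun x acc => sufStepA y acc x) ([], none) = ((sufSpec y l).reverse, bOf y l) := by
  intro l
  induction l with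
  | nil => simp [sufSpec, bOf]
  | cons a t ih =>
      rw [List.foldr_cons, ih]
      cases ht : bOf y t with
      | none =>
          have ht0 : t = [] := (bOf_eq_none y t).mp ht
          subst ht0
          simp [sufStepA, sufSpec, bOf, vOf]
      | some b =>
          rw [bOf_cons_some y a t b ht]
          by_cases hlt : vOf y a < b
          · have hall : ∀ j ∈ t, vOf y a < vOf y j := (bOf_lt_iff y (vOf y a) t b ht).mp hlt
            have hsuf : sufSpec y (a :: t) = a :: sufSpec y t := by rw [sufSpec, if_pos hall]
            rw [hsuf]
            show (if vOf y a < b then ((sufSpec y t).reverse ++ [a], some (vOf y a))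
                  else ((sufSpec y t).reverse, some b)) = _
            rw [if_pos hlt, min_eq_left hlt.le]
            simp
          · have hnall : ¬ ∀ j ∈ t, vOf y a < vOf y j :=
              fun hall => hlt ((bOf_lt_iff y (vOf y a) t b ht).mpr hall)
            have hsuf : sufSpec y (a :: t) = sufSpec y t := by rw [sufSpec, if_neg hnall]
            rw [hsuf]
            show (if vOf y a < b then ((sufSpec y t).reverse ++ [a], some (vOf y a))
                  else ((sufSpec y t).reverse, some b)) = _
            rw [if_neg hlt, min_eq_right (not_lt.mp hlt)]

-- B's pop loop characterised on a value-sorted stack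
theorem popW_spec (y : List Int) (x : Int) :
    ∀ st : List Int, st.Pairwise (fun a b => vOf y b < vOf y a) →
      popW y st x = st.filter (fun j => decide (vOf y j < x)) := by
  intro st
  induction st with
  | nil => intro _; simp [popW]
  | cons j rest ih =>
      intro hp
      rcases List.pairwise_cons.mp hp with ⟨hj, hrest⟩
      by_cases hx : x ≤ vOf y j
      · have hnot : ¬ (vOf y j < x) := not_lt.mpr hx
        show (if x ≤ vOf y j then popW y rest x else j :: rest) = _
        rw [if_pos hx, ih hrest, List.filter_cons_of_neg (by simpa using hnot)]
      · have hlt : vOf y j < x := lt_of_not_ge hx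
        show (if x ≤ vOf y j then popW y rest x else j :: rest) = _
        rw [if_neg hx, List.filter_cons_of_pos (by simpa using hlt)]
        exact congrArg (j :: ·)
          (List.filter_eq_self.mpr (fun k hk => by
            simpa using lt_trans (hj k hk) hlt)).symm

-- B's left-to-right fold: the stack holds exactly the record lows of what was seen
theorem foldB_spec (y : List Int) :
    ∀ (l st : List Int), st.Pairwise (fun a b => vOf y b < vOf y a) →
      l.foldl (fun st idx => idx :: popW y st ((PySem.List.pyGet? y idx).getD 0)) st
        = (sufSpec y l).reverse
          ++ st.filter (fun j => l.all (fun k => decide (vOf y j < vOf y k))) := by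
  intro l
  induction l with
  | nil =>
      intro st _
      simp [sufSpec]
  | cons x l ih =>
      intro st hp
      rw [List.foldl_cons]
      have hpop : popW y st ((PySem.List.pyGet? y x).getD 0)
          = st.filter (fun j => decide (vOf y j < vOf y x)) := popW_spec y (vOf y x) st hp
      have hp' : (x :: popW y st ((PySem.List.pyGet? y x).getD 0)).Pairwise
          (fun a b => vOf y b < vOf y a) := by
        rw [hpop]
        refine List.pairwise_cons.mpr ⟨?_, hp.filter _⟩
        intro j hjf
        exact of_decide_eq_true (List.mem_filter.mp hjf).2
      rw [ih _ hp', hpop, List.filter_cons, List.filter_filter]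
      have hC : st.filter (fun j =>
            (l.all fun k => decide (vOf y j < vOf y k)) && decide (vOf y j < vOf y x))
          = st.filter (fun j => (x :: l).all fun k => decide (vOf y j < vOf y k)) :=
        List.filter_congr (fun j _ => by rw [List.all_cons, Bool.and_comm])
      cases hPx : l.all (fun k => decide (vOf y x < vOf y k)) with
      | true =>
          have hx : ∀ j ∈ l, vOf y x < vOf y j := by
            intro j hj
            exact of_decide_eq_true (List.all_eq_true.mp hPx j hj)
          have hsuf : sufSpec y (x :: l) = x :: sufSpec y l := by rw [sufSpec, if_pos hx]
          rw [if_pos rfl, hC, hsuf, List.reverse_cons, List.append_assoc,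
            List.singleton_append]
      | false =>
          have hx : ¬ ∀ j ∈ l, vOf y x < vOf y j := by
            intro h
            exact absurd (List.all_eq_true.mpr fun k hk => decide_eq_true (h k hk))
              (by simp [hPx])
          have hsuf : sufSpec y (x :: l) = sufSpec y l := by rw [sufSpec, if_neg hx]
          rw [if_neg (by simp), hC, hsuf]

theorem portA_eq_spec (min_idxs y : List Int) :
    suffix_record_low_minima_py min_idxs y = sufSpec y min_idxs := by
  unfold suffix_record_low_minima_py
  rw [List.foldl_reverse, foldA_spec]
  simp

theorem portB_eq_spec (min_idxs y : List Int) :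
    suffix_record_low_minima_py_alt min_idxs y = sufSpec y min_idxs := by
  unfold suffix_record_low_minima_py_alt
  rw [foldB_spec y min_idxs [] List.Pairwise.nil]
  simp

-- ===== VERDICT (by name: the statement is the Claim_ definition above) =====
theorem suffix_record_low_minima_py_spec : Claim_equal_suffix_record_low_minima_py := by
  intro min_idxs y _ _
  unfold Spec_suffix_record_low_minima_py
  rw [portA_eq_spec, portB_eq_spec]
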